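-- pv_equiv track=rewrite | github.com/Burke0/Foobar-Challenge-Find-The-Access-Codes | solutionFailed.py | solution
-- ===== SOURCE A (Python) =====
-- def solution(l):
--     count = 0
--     n = len(l)
--     for i in range(n):
--         for j in range(i+1, n):
--             if l[j] % l[i] == 0:
--                 for k in range(j+1, n):
--                     if l[k] % l[j] == 0:
--                         count += 1
--     return count
-- ===== SOURCE B (Python) =====
-- def solution(l):
--     n = len(l)
--     divs = [sum(1 for i in range(j) if l[j] % l[i] == 0) for j in range(n)]
--     total = 0
--     for j in range(n):
--         for k in range(j + 1, n):
--             if l[k] % l[j] == 0: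
--                 total += divs[j]
--     return total
-- ===== Notes on version B (the rewrite author's own statement) =====
-- stated objective: faster
-- what changed: Replaces the triple nested loop by a precomputed table divs[j] = number of earlier divisors of l[j], then a single double loop over divisible pairs (j,k) adds divs[j] - O(n^2) instead of O(n^3).
import Mathlib
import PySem

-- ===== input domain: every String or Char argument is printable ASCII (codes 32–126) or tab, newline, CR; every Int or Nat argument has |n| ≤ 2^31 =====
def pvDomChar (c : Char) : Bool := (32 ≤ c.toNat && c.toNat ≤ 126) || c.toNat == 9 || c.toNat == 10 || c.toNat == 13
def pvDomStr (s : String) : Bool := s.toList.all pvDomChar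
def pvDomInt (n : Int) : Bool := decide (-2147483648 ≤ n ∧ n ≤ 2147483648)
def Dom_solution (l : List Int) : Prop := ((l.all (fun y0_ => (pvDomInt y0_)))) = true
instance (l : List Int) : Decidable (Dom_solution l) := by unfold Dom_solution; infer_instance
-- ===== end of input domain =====

-- B replaces A's triple nested loop by a precomputed divisor-count table plus one double loop; the claimed speed-up is checked in a timing run.


-- ===== PORT A =====
def solution (l : List Int) : Int :=
  (PySem.List.pyRange 0 (l.length : Int) 1).foldl (fun count i =>
    (PySem.List.pyRange (i + 1) (l.length : Int) 1).foldl (fun count j =>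
      if PySem.Int.mod (PySem.List.pyGetD l j 0) (PySem.List.pyGetD l i 0) == 0 then
        (PySem.List.pyRange (j + 1) (l.length : Int) 1).foldl (fun count k =>
          if PySem.Int.mod (PySem.List.pyGetD l k 0) (PySem.List.pyGetD l j 0) == 0 then
            count + 1
          else count) count
      else count) count) 0

-- ===== PORT B =====
-- the local 'divs' list of Source B: divs[j] = number of i < j with l[j] % l[i] == 0
def solutionAltDivs (l : List Int) : List Int :=
  (PySem.List.pyRange 0 (l.length : Int) 1).map (fun j =>
    (PySem.List.pyRange 0 j 1).foldl (fun s i =>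
      if PySem.Int.mod (PySem.List.pyGetD l j 0) (PySem.List.pyGetD l i 0) == 0 then s + 1 else s) 0)

def solution_alt (l : List Int) : Int :=
  (PySem.List.pyRange 0 (l.length : Int) 1).foldl (fun total j =>
    (PySem.List.pyRange (j + 1) (l.length : Int) 1).foldl (fun total k =>
      if PySem.Int.mod (PySem.List.pyGetD l k 0) (PySem.List.pyGetD l j 0) == 0 then
        total + PySem.List.pyGetD (solutionAltDivs l) j 0
      else total) total) 0

-- ===== PRECONDITION & SPEC =====
-- Pre_ excludes exactly the inputs where the Python A raises ZeroDivisionError: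
-- a 0 anywhere except the last position is eventually used as a '%' divisor (B raises there too).
def Pre_solution (l : List Int) : Prop := (0 : Int) ∉ l.dropLast
instance (l : List Int) : Decidable (Pre_solution l) := by unfold Pre_solution; infer_instance
def pvWitness_solution : List Int := [1, 2, 4, 8, 3]
def Spec_solution (l : List Int) (out : Int) : Prop := out = solution_alt l
instance (l : List Int) (out : Int) : Decidable (Spec_solution l out) := by unfold Spec_solution; infer_instance

-- ===== CLAIM (what is proved, stated in full; the proofs are below) =====
def Claim_equal_solution : Prop := ∀ (l : List Int), Dom_solution l → Pre_solution l → Spec_solution l (solution l)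

-- ===== LEMMAS AND PROOFS =====

-- indicator of the divisibility test l[j] % l[i] == 0, and the two per-index counts
def pvInd (l : List Int) (i j : Int) : Int :=
  if PySem.Int.mod (PySem.List.pyGetD l j 0) (PySem.List.pyGetD l i 0) = 0 then 1 else 0

def pvG (l : List Int) (j : Int) : Int :=
  ((PySem.List.pyRange (j + 1) (l.length : Int) 1).map (fun k => pvInd l j k)).sum

def pvD (l : List Int) (j : Int) : Int :=
  ((PySem.List.pyRange 0 j 1).map (fun i => pvInd l i j)).sum

-- a fold of "if p x then s + v x else s" is the initial value plus a sum
theorem pv_foldl_ite_add {α : Type} (L : List α) (p : α → Prop) [DecidablePred p]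
    (v : α → Int) (s0 : Int) :
    L.foldl (fun s x => if p x then s + v x else s) s0
      = s0 + (L.map (fun x => if p x then v x else 0)).sum := by
  have h : (fun (s : Int) (x : α) => if p x then s + v x else s)
      = (fun (s : Int) (x : α) => s + (if p x then v x else 0)) := by
    funext s x; by_cases hp : p x <;> simp [hp]
  rw [h, PySem.List.foldl_add]

theorem pv_sum_ite_const {α : Type} (L : List α) (p : α → Prop) [DecidablePred p] (c : Int) :
    (L.map (fun x => if p x then c else 0)).sum
      = (L.map (fun x => if p x then (1 : Int) else 0)).sum * c := by
  induction L with
  | nil => simp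
  | cons a t ih =>
    by_cases hp : p a
    · simp [hp, ih]; ring
    · simp [hp, ih]

-- A's value as a double sum of pvInd * pvG
theorem pvA_sum (l : List Int) :
    solution l = ((PySem.List.pyRange 0 (l.length : Int) 1).map (fun i =>
      ((PySem.List.pyRange (i + 1) (l.length : Int) 1).map (fun j =>
        pvInd l i j * pvG l j)).sum)).sum := by
  unfold solution
  simp only [beq_iff_eq, pv_foldl_ite_add, PySem.List.foldl_add, zero_add]
  apply congrArg List.sum
  apply List.map_congr_left
  intro i _
  apply congrArg List.sum
  apply List.map_congr_left
  intro j _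
  by_cases hp : PySem.Int.mod (PySem.List.pyGetD l j 0) (PySem.List.pyGetD l i 0) = 0 <;>
    simp [hp, pvInd, pvG]

-- B's value as a sum of pvD * pvG over j
theorem pvB_sum (l : List Int) :
    solution_alt l = ((PySem.List.pyRange 0 (l.length : Int) 1).map (fun j =>
      pvD l j * pvG l j)).sum := by
  unfold solution_alt
  simp only [beq_iff_eq, pv_foldl_ite_add, PySem.List.foldl_add, zero_add]
  apply congrArg List.sum
  apply List.map_congr_left
  intro j hj
  have h0 := PySem.List.mem_pyRange_one.mp hj
  rw [pv_sum_ite_const]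
  have hdiv : PySem.List.pyGetD (solutionAltDivs l) j 0 = pvD l j := by
    unfold solutionAltDivs
    rw [PySem.List.pyGetD_map_pyRange_of_nonneg _ _ _ _ h0.1 h0.2]
    simp only [beq_iff_eq, pv_foldl_ite_add, zero_add]
    rfl
  rw [hdiv]
  simp only [pvD, pvG, pvInd]
  exact mul_comm _ _

-- the triangle swap: summing over i then j ∈ (i, n) equals summing over j then i ∈ [0, j)
theorem pv_swap (t : Int → Int → Int) (m : Nat) :
    ((PySem.List.pyRange 0 (m : Int) 1).map (fun i =>
      ((PySem.List.pyRange (i + 1) (m : Int) 1).map (fun j => t i j)).sum)).sum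
    = ((PySem.List.pyRange 0 (m : Int) 1).map (fun j =>
      ((PySem.List.pyRange 0 j 1).map (fun i => t i j)).sum)).sum := by
  induction m with
  | zero => simp [PySem.List.pyRange_one_eq_nil]
  | succ m ih =>
    have hcast : ((m + 1 : Nat) : Int) = (m : Int) + 1 := by push_cast; ring
    rw [hcast, PySem.List.pyRange_one_succ_right (by positivity)]
    simp only [List.map_append, List.sum_append, List.map_cons, List.map_nil,
      List.sum_cons, List.sum_nil]
    have hlast : PySem.List.pyRange ((m : Int) + 1) ((m : Int) + 1) 1 = [] :=
      PySem.List.pyRange_one_eq_nil (le_refl _)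
    have hL : (PySem.List.pyRange 0 (m : Int) 1).map (fun i =>
        ((PySem.List.pyRange (i + 1) ((m : Int) + 1) 1).map (fun j => t i j)).sum)
      = (PySem.List.pyRange 0 (m : Int) 1).map (fun i =>
        ((PySem.List.pyRange (i + 1) (m : Int) 1).map (fun j => t i j)).sum + t i m) := by
      apply List.map_congr_left
      intro i hi
      have hib := PySem.List.mem_pyRange_one.mp hi
      rw [PySem.List.pyRange_one_succ_right (by omega)]
      simp
    rw [hL, hlast, PySem.List.sum_map_add_int]
    simp only [List.map_nil, List.sum_nil, add_zero]
    rw [ih]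

theorem pv_final (l : List Int) : solution l = solution_alt l := by
  rw [pvA_sum, pvB_sum, pv_swap (fun i j => pvInd l i j * pvG l j) l.length]
  apply congrArg List.sum
  apply List.map_congr_left
  intro j _
  rw [List.sum_map_mul_right, pvD]

-- ===== VERDICT (by name: the statement is the Claim_ definition above) =====
theorem solution_spec : Claim_equal_solution := by
  intro l _ _
  unfold Spec_solution
  exact pv_final l
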